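-- pv_equiv track=rewrite | github.com/phr-nk/Python-functions | Recursion Functions.py | RdeleteEveryOther
-- ===== SOURCE A (Python) =====
-- def RdeleteEveryOther(lst):
--     '''This function as input a list and returns another list with every other element from the orginal list'''
--     if lst == []:
--         return []
--     else:
--         temp = RdeleteEveryOther(lst[:-1])
--         index = len(lst) - 1 #finde index by taking length minus 1
--         if index % 2 ==  0: #check if index is an even position
--             temp += [lst[-1]] #if so, add a list of just that element to the end of temp
--
--
--         return temp
-- ===== SOURCE B (Python) =====
-- def RdeleteEveryOther(lst):
--     '''This function as input a list and returns another list with every other element from the orginal list'''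
--     res = []
--     for i in range(0, len(lst), 2):
--         res.append(lst[i])
--     return res
-- ===== Notes on version B (the rewrite author's own statement) =====
-- stated objective: faster
-- what changed: Replaces the linear recursion that repeatedly copies lst[:-1] and appends the last element when its index is even with a single forward index-stepping loop over range(0, len(lst), 2) that appends lst[i] to an accumulator.
import Mathlib
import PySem

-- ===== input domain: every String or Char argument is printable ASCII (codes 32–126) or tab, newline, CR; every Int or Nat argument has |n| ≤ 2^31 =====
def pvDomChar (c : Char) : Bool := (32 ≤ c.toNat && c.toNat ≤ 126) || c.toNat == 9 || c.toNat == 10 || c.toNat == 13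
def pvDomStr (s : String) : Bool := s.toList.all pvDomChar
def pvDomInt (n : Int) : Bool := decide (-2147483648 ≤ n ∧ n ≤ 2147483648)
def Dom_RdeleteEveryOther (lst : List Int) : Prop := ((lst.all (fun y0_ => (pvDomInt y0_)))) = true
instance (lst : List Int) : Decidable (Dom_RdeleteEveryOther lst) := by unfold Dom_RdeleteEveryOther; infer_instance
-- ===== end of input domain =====

-- B replaces A's last-element recursion by a single forward index-stepping loop (faster: avoids repeated list copying).


-- ===== PORT A =====
-- literal port of the recursion: recurse on lst[:-1], then append lst[-1] if len(lst)-1 is even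
def RdeleteEveryOther (lst : List Int) : List Int :=
  if h : lst = [] then []
  else
    let temp := RdeleteEveryOther (PySem.List.slice lst none (some (-1)))
    let index : Int := (lst.length : Int) - 1
    if PySem.Int.mod index 2 = 0 then temp ++ [PySem.List.pyGetD lst (-1) 0] else temp
termination_by lst.length
decreasing_by
  simp [PySem.List.slice_to_neg_one]
  exact List.length_pos_of_ne_nil h

-- ===== PORT B =====
-- literal port of the forward loop: for i in range(0, len(lst), 2): res.append(lst[i])
def RdeleteEveryOther_alt (lst : List Int) : List Int :=
  (PySem.List.pyRange 0 (lst.length : Int) 2).foldl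
    (fun res i => res ++ [PySem.List.pyGetD lst i 0]) []

-- ===== PRECONDITION & SPEC =====
def Spec_RdeleteEveryOther (lst : List Int) (out : List Int) : Prop := out = RdeleteEveryOther_alt lst
instance (lst : List Int) (out : List Int) : Decidable (Spec_RdeleteEveryOther lst out) := by unfold Spec_RdeleteEveryOther; infer_instance

-- ===== CLAIM (what is proved, stated in full; the proofs are below) =====
def Claim_equal_RdeleteEveryOther : Prop := ∀ (lst : List Int), Dom_RdeleteEveryOther lst → Spec_RdeleteEveryOther lst (RdeleteEveryOther lst)

-- ===== LEMMAS AND PROOFS =====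

-- A appends x exactly when the index l.length is even
lemma A_append (l : List Int) (x : Int) :
    RdeleteEveryOther (l ++ [x]) =
      RdeleteEveryOther l ++ (if (l.length : Int) % 2 = 0 then [x] else []) := by
  conv_lhs => rw [RdeleteEveryOther.eq_def]
  simp [PySem.List.slice_to_neg_one, PySem.List.pyGetD_neg_one_append_singleton,
    PySem.Int.mod]
  have hm : ((l.length : Int)).fmod 2 = (l.length : Int) % 2 := by
    rw [Int.fmod_eq_emod]; simp
  rw [hm]
  by_cases h : (l.length : Int) % 2 = 0 <;>
    simp [h, Int.dvd_iff_emod_eq_zero]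

-- appending an element does not change reads at valid indices
lemma getD_append (l : List Int) (x : Int) (i : Int) (h0 : 0 ≤ i) (h1 : i < (l.length : Int)) :
    PySem.List.pyGetD (l ++ [x]) i 0 = PySem.List.pyGetD l i 0 := by
  rw [PySem.List.pyGetD_eq_getElem _ _ h0 (by simp; omega),
      PySem.List.pyGetD_eq_getElem _ _ h0 h1]
  have hi : i.toNat < l.length := by omega
  exact List.getElem_append_left hi

-- B as a map over the step-2 range
lemma B_eq_map (lst : List Int) :
    RdeleteEveryOther_alt lst =
      (PySem.List.pyRange 0 (lst.length : Int) 2).map (fun i => PySem.List.pyGetD lst i 0) := by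
  unfold RdeleteEveryOther_alt
  simpa using PySem.List.foldl_append_singleton_eq_map
    (fun i => PySem.List.pyGetD lst i 0) (PySem.List.pyRange 0 (lst.length : Int) 2) []

lemma B_append (l : List Int) (x : Int) :
    RdeleteEveryOther_alt (l ++ [x]) =
      RdeleteEveryOther_alt l ++ (if (l.length : Int) % 2 = 0 then [x] else []) := by
  rw [B_eq_map, B_eq_map]
  rw [PySem.List.pyRange_of_pos 0 (((l ++ [x]).length : Int)) (by norm_num : (0:Int) < 2),
      PySem.List.pyRange_of_pos 0 ((l.length : Int)) (by norm_num : (0:Int) < 2)]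
  simp only [List.length_append, List.length_singleton, List.map_map]
  have hcnt : ∀ n : Nat, (if (0:Int) < (n:Int) then (((n:Int) - 0 + 2 - 1) / 2).toNat else 0) = (n + 1) / 2 := by
    intro n
    split_ifs with h
    · omega
    · omega
  rw [hcnt, hcnt]
  rcases Nat.even_or_odd l.length with ⟨q, hq⟩ | ⟨q, hq⟩
  · have h1 : (l.length + 1 + 1) / 2 = q + 1 := by omega
    have h2 : (l.length + 1) / 2 = q := by omega
    have hif : (if (l.length : Int) % 2 = 0 then [x] else ([] : List Int)) = [x] := by
      rw [if_pos]; omega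
    rw [h1, h2, hif, List.range_succ, List.map_append]
    congr 1
    · refine List.map_congr_left (fun k hk => ?_)
      simp only [Function.comp_apply, zero_add]
      exact getD_append l x _ (by positivity) (by simp at hk; omega)
    · simp only [List.map_singleton, Function.comp_apply, zero_add]
      rw [PySem.List.pyGetD_eq_getElem _ _ (by positivity) (by simp; omega)]
      have ht : ((2 * (q : Int)).toNat) = l.length := by omega
      simp [ht]
  · have h1 : (l.length + 1 + 1) / 2 = q + 1 := by omega
    have h2 : (l.length + 1) / 2 = q + 1 := by omega
    have hif : (if (l.length : Int) % 2 = 0 then [x] else ([] : List Int)) = [] := by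
      rw [if_neg]; omega
    rw [h1, h2, hif, List.append_nil]
    refine List.map_congr_left (fun k hk => ?_)
    simp only [Function.comp_apply, zero_add]
    exact getD_append l x _ (by positivity) (by simp at hk; omega)

-- the two ports agree on every list
lemma AB (lst : List Int) : RdeleteEveryOther lst = RdeleteEveryOther_alt lst := by
  induction lst using List.reverseRecOn with
  | nil =>
      rw [RdeleteEveryOther.eq_def]
      simp [RdeleteEveryOther_alt, PySem.List.pyRange_of_pos (0:Int) 0 (by norm_num : (0:Int) < 2)]
  | append_singleton l x ih => rw [A_append, B_append, ih]

-- ===== VERDICT (by name: the statement is the Claim_ definition above) =====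
theorem RdeleteEveryOther_spec : Claim_equal_RdeleteEveryOther := by
  intro lst _
  exact AB lst
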